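-- pv_equiv track=rewrite | github.com/dc-77/vectiscan | scan-worker/scanner/phase0.py | _sort_fqdns_by_relevance
-- ===== SOURCE A (Python) =====
-- _MAIL_PREFIXES = ("mail.", "email.", "mx.", "smtp.", "imap.", "pop.",
--                    "autodiscover.", "exchange.", "webmail.", "fin-mail.")
--
-- def _sort_fqdns_by_relevance(fqdns: list[str], domain: str) -> list[str]:
--     """Sort FQDNs by scanning relevance: base domain first, www second, mail last."""
--     domain_lower = domain.lower()
--
--     def priority(fqdn: str) -> int:
--         f = fqdn.lower()
--         if f == domain_lower:
--             return 0  # Base domain always first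
--         if f == f"www.{domain_lower}":
--             return 1  # www second
--         if any(f.startswith(p) for p in _MAIL_PREFIXES):
--             return 9  # Mail FQDNs last
--         return 5  # Everything else in the middle
--
--     return sorted(fqdns, key=lambda f: (priority(f), f))
-- ===== SOURCE B (Python) =====
-- _MAIL_PREFIXES = ("mail.", "email.", "mx.", "smtp.", "imap.", "pop.",
--                    "autodiscover.", "exchange.", "webmail.", "fin-mail.")
--
-- def _sort_fqdns_by_relevance(fqdns: list[str], domain: str) -> list[str]:
--     """Scatter FQDNs into priority buckets in one pass, lex-sort each bucket, concatenate."""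
--     domain_lower = domain.lower()
--
--     def priority(fqdn: str) -> int:
--         f = fqdn.lower()
--         if f == domain_lower:
--             return 0
--         if f == f"www.{domain_lower}":
--             return 1
--         if any(f.startswith(p) for p in _MAIL_PREFIXES):
--             return 9
--         return 5
--
--     base, www, other, mail = [], [], [], []
--     for f in fqdns:
--         pr = priority(f)
--         if pr == 0:
--             base.append(f)
--         elif pr == 1:
--             www.append(f)
--         elif pr == 5:
--             other.append(f)
--         else:
--             mail.append(f)
--     return sorted(base) + sorted(www) + sorted(other) + sorted(mail)
-- ===== Notes on version B (the rewrite author's own statement) =====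
-- stated objective: alternative
-- what changed: Replaces the single stable sort on the composite key (priority, fqdn) with a bucket decomposition: one pass scatters each FQDN (priority computed once) into its priority class (base/www/other/mail), each class is sorted lexicographically on its own, and the sorted classes are concatenated in fixed priority order.
import Mathlib
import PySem

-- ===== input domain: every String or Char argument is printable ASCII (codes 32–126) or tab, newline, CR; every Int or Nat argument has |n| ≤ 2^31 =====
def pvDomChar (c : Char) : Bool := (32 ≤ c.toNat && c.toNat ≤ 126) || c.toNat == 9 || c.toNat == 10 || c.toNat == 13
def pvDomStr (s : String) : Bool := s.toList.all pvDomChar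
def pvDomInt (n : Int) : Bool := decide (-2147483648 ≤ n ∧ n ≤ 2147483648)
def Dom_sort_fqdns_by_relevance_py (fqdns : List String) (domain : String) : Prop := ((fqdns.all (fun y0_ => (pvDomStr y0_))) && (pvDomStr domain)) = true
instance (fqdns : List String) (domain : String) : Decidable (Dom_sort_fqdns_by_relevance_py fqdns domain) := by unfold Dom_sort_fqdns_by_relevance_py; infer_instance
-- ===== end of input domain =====

-- B replaces A's single composite-key sort by bucketing FQDNs into the four priority classes,
-- sorting each class lexicographically, and concatenating them in priority order (alternative decomposition, same cost).


-- ===== PORT A =====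
def pvMailPrefixes : List String :=
  ["mail.", "email.", "mx.", "smtp.", "imap.", "pop.",
   "autodiscover.", "exchange.", "webmail.", "fin-mail."]

-- the inner 'priority' closure, shared verbatim by both Pythons
def pvPriority (domain_lower : String) (fqdn : String) : Int :=
  let f := PySem.Str.lower fqdn
  if f = domain_lower then 0
  else if f = "www." ++ domain_lower then 1
  else if pvMailPrefixes.any (fun p => PySem.Str.startswith f p) then 9
  else 5

def sort_fqdns_by_relevance_py (fqdns : List String) (domain : String) : List String :=
  let domain_lower := PySem.Str.lower domain
  PySem.List.sorted2 fqdns (fun f => pvPriority domain_lower f) (fun f => f) false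

-- ===== PORT B =====
def sort_fqdns_by_relevance_py_alt (fqdns : List String) (domain : String) : List String :=
  let domain_lower := PySem.Str.lower domain
  -- one pass: scatter each fqdn into the bucket of its priority class
  let bs : List String × List String × List String × List String :=
    fqdns.foldl (fun acc f =>
      let pr := pvPriority domain_lower f
      if pr == 0 then (acc.1 ++ [f], acc.2.1, acc.2.2.1, acc.2.2.2)
      else if pr == 1 then (acc.1, acc.2.1 ++ [f], acc.2.2.1, acc.2.2.2)
      else if pr == 5 then (acc.1, acc.2.1, acc.2.2.1 ++ [f], acc.2.2.2)
      else (acc.1, acc.2.1, acc.2.2.1, acc.2.2.2 ++ [f])) ([], [], [], [])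
  PySem.List.sorted bs.1 (fun f => f) false ++ PySem.List.sorted bs.2.1 (fun f => f) false
    ++ PySem.List.sorted bs.2.2.1 (fun f => f) false ++ PySem.List.sorted bs.2.2.2 (fun f => f) false

-- ===== PRECONDITION & SPEC =====
def Spec_sort_fqdns_by_relevance_py (fqdns : List String) (domain : String) (out : List String) : Prop := out = sort_fqdns_by_relevance_py_alt fqdns domain
instance (fqdns : List String) (domain : String) (out : List String) : Decidable (Spec_sort_fqdns_by_relevance_py fqdns domain out) := by unfold Spec_sort_fqdns_by_relevance_py; infer_instance

-- ===== CLAIM (what is proved, stated in full; the proofs are below) =====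
def Claim_equal_sort_fqdns_by_relevance_py : Prop := ∀ (fqdns : List String) (domain : String), Dom_sort_fqdns_by_relevance_py fqdns domain → Spec_sort_fqdns_by_relevance_py fqdns domain (sort_fqdns_by_relevance_py fqdns domain)

-- ===== LEMMAS AND PROOFS =====

-- the combined sort key of A, as a linearly ordered value
def pvKey (p : String → Int) (f : String) : Lex (Int × String) := toLex (p f, f)

theorem pvKey_injective (p : String → Int) : Function.Injective (pvKey p) := by
  intro a b h
  exact congrArg (fun x => (ofLex x).2) h

-- A's sorted2 with key (p f, f) is an ordinary sort by the lex key
theorem pvSorted2_eq (xs : List String) (p : String → Int) :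
    PySem.List.sorted2 xs p (fun f => f) false
      = PySem.List.sorted xs (pvKey p) false := by
  unfold PySem.List.sorted2 PySem.List.sorted
  simp only [Bool.false_eq_true, if_false]
  have hb : (fun a b => decide (p a < p b) || (!decide (p b < p a) && decide (a < b)))
      = (fun a b : String => decide (pvKey p a < pvKey p b)) := by
    funext a b
    rcases lt_trichotomy (p a) (p b) with h | h | h
    · simp [pvKey, Prod.Lex.lt_iff, h]
    · simp [pvKey, Prod.Lex.lt_iff, h]
    · simp [pvKey, Prod.Lex.lt_iff, h, not_lt_of_gt h, ne_of_gt h]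
  rw [hb]

theorem pvPriority_range (dl f : String) :
    pvPriority dl f = 0 ∨ pvPriority dl f = 1 ∨ pvPriority dl f = 5 ∨ pvPriority dl f = 9 := by
  unfold pvPriority
  dsimp only
  split_ifs <;> simp

-- the four buckets are a permutation of the input
theorem pvPartitionPerm (p : String → Int)
    (hp : ∀ x, p x = 0 ∨ p x = 1 ∨ p x = 5 ∨ p x = 9) (xs : List String) :
    (xs.filter (fun f => p f == 0) ++ (xs.filter (fun f => p f == 1)
      ++ (xs.filter (fun f => p f == 5) ++ xs.filter (fun f => p f == 9)))).Perm xs := by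
  induction xs with
  | nil => simp
  | cons x t ih =>
    rcases hp x with h | h | h | h <;> simp only [List.filter_cons, h] <;> norm_num
    · exact ih
    · exact List.perm_middle.trans (ih.cons x)
    · exact (List.Perm.append_left _ List.perm_middle).trans (List.perm_middle.trans (ih.cons x))
    · exact (List.Perm.append_left _ ((List.Perm.append_left _ List.perm_middle).trans List.perm_middle)).trans
        (List.perm_middle.trans (ih.cons x))

-- members of a sorted bucket have the bucket's priority
theorem pvBucketMemP (p : String → Int) (xs : List String) (v : Int) :
    ∀ a ∈ PySem.List.sorted (xs.filter (fun f => p f == v)) (fun f => f) false, p a = v := by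
  intro a ha
  rw [PySem.List.mem_sorted, List.mem_filter] at ha
  exact beq_iff_eq.mp ha.2

-- a sorted bucket is pairwise ≤ under the lex key
theorem pvBucketPairwise (p : String → Int) (xs : List String) (v : Int) :
    (PySem.List.sorted (xs.filter (fun f => p f == v)) (fun f => f) false).Pairwise
      (fun a b => pvKey p a ≤ pvKey p b) := by
  have hmem := pvBucketMemP p xs v
  have := PySem.List.sorted_pairwise (xs.filter (fun f => p f == v)) (fun f => f)
  refine this.imp_of_mem ?_
  intro a b ha hb hab
  rw [Prod.Lex.le_iff]
  right
  refine ⟨?_, hab⟩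
  show p a = p b
  rw [hmem a ha, hmem b hb]

theorem pvCross (p : String → Int) {v w : Int} (hvw : v < w) {a b : String}
    (ha : p a = v) (hb : p b = w) : pvKey p a ≤ pvKey p b := by
  rw [Prod.Lex.le_iff]
  left
  show p a < p b
  omega

-- the one-pass scatter computes the four priority-class filters
theorem pvScatter (p : String → Int)
    (hp : ∀ x, p x = 0 ∨ p x = 1 ∨ p x = 5 ∨ p x = 9) (xs : List String)
    (a b c d : List String) :
    xs.foldl (fun acc f =>
        let pr := p f
        if pr == 0 then (acc.1 ++ [f], acc.2.1, acc.2.2.1, acc.2.2.2)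
        else if pr == 1 then (acc.1, acc.2.1 ++ [f], acc.2.2.1, acc.2.2.2)
        else if pr == 5 then (acc.1, acc.2.1, acc.2.2.1 ++ [f], acc.2.2.2)
        else (acc.1, acc.2.1, acc.2.2.1, acc.2.2.2 ++ [f])) (a, b, c, d)
      = (a ++ xs.filter (fun f => p f == 0), b ++ xs.filter (fun f => p f == 1),
         c ++ xs.filter (fun f => p f == 5), d ++ xs.filter (fun f => p f == 9)) := by
  induction xs generalizing a b c d with
  | nil => simp
  | cons x t ih =>
    rw [List.foldl_cons]
    rcases hp x with h | h | h | h <;>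
      simp only [h, Int.reduceBEq, reduceIte] <;> rw [ih] <;>
      simp [List.filter_cons, h]

theorem sort_fqdns_eq (fqdns : List String) (domain : String) :
    sort_fqdns_by_relevance_py fqdns domain = sort_fqdns_by_relevance_py_alt fqdns domain := by
  unfold sort_fqdns_by_relevance_py sort_fqdns_by_relevance_py_alt
  dsimp only
  rw [pvSorted2_eq fqdns (fun f => pvPriority (PySem.Str.lower domain) f),
    pvScatter (fun f => pvPriority (PySem.Str.lower domain) f)
      (fun x => pvPriority_range (PySem.Str.lower domain) x) fqdns [] [] [] []]
  dsimp only
  simp only [List.nil_append]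
  simp only [List.append_assoc]
  have hrange : ∀ x, (fun f => pvPriority (PySem.Str.lower domain) f) x = 0 ∨
      (fun f => pvPriority (PySem.Str.lower domain) f) x = 1 ∨
      (fun f => pvPriority (PySem.Str.lower domain) f) x = 5 ∨
      (fun f => pvPriority (PySem.Str.lower domain) f) x = 9 :=
    fun x => pvPriority_range (PySem.Str.lower domain) x
  apply PySem.List.eq_of_perm_of_pairwise_le_of_injective
      (pvKey (fun f => pvPriority (PySem.Str.lower domain) f))
      (pvKey_injective (fun f => pvPriority (PySem.Str.lower domain) f))
  · refine (PySem.List.sorted_perm fqdns _ false).trans ?_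
    refine ((pvPartitionPerm _ hrange fqdns).symm).trans ?_
    exact ((PySem.List.sorted_perm _ (fun f => f) false).symm.append
      (((PySem.List.sorted_perm _ (fun f => f) false).symm.append
        (((PySem.List.sorted_perm _ (fun f => f) false).symm.append
          ((PySem.List.sorted_perm _ (fun f => f) false).symm))))))
  · exact PySem.List.sorted_pairwise fqdns _
  · rw [List.pairwise_append]
    refine ⟨pvBucketPairwise _ fqdns 0, ?_, ?_⟩
    · rw [List.pairwise_append]
      refine ⟨pvBucketPairwise _ fqdns 1, ?_, ?_⟩
      · rw [List.pairwise_append]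
        refine ⟨pvBucketPairwise _ fqdns 5, pvBucketPairwise _ fqdns 9, ?_⟩
        intro a ha b hb
        exact pvCross _ (by norm_num) (pvBucketMemP _ fqdns 5 a ha) (pvBucketMemP _ fqdns 9 b hb)
      · intro a ha b hb
        rcases List.mem_append.mp hb with hb | hb
        · exact pvCross _ (by norm_num) (pvBucketMemP _ fqdns 1 a ha) (pvBucketMemP _ fqdns 5 b hb)
        · exact pvCross _ (by norm_num) (pvBucketMemP _ fqdns 1 a ha) (pvBucketMemP _ fqdns 9 b hb)
    · intro a ha b hb
      rcases List.mem_append.mp hb with hb | hb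
      · exact pvCross _ (by norm_num) (pvBucketMemP _ fqdns 0 a ha) (pvBucketMemP _ fqdns 1 b hb)
      rcases List.mem_append.mp hb with hb | hb
      · exact pvCross _ (by norm_num) (pvBucketMemP _ fqdns 0 a ha) (pvBucketMemP _ fqdns 5 b hb)
      · exact pvCross _ (by norm_num) (pvBucketMemP _ fqdns 0 a ha) (pvBucketMemP _ fqdns 9 b hb)

-- ===== VERDICT (by name: the statement is the Claim_ definition above) =====
theorem sort_fqdns_by_relevance_py_spec : Claim_equal_sort_fqdns_by_relevance_py := by
  intro fqdns domain _
  exact sort_fqdns_eq fqdns domain
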